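-- pv_equiv track=rewrite | github.com/cooperative-computing-lab/taskvine-report-tool | taskvine_report/utils.py | downsample_points
-- ===== SOURCE A (Python) =====
-- def _apply_start_point_zero_condition(points, y_index=1):
--     """
--     Apply special condition: if first point has x > 0 and y > 0, set y to 0.
--
--     Args:
--         points: List of points (tuples)
--         y_index: Index of y coordinate in the tuple
--
--     Returns:
--         Modified points list
--     """
--     if not points or len(points[0]) <= y_index:
--         return points
--
--     first_point = points[0]
--     x_val, y_val = first_point[0], first_point[y_index]
--
--     # Only modify if both x > 0 and y > 0
--     if x_val > 0 and y_val > 0: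
--         # Create new tuple with y set to 0
--         modified_point = list(first_point)
--         modified_point[y_index] = 0
--         points[0] = tuple(modified_point)
--
--     return points
--
-- def downsample_points(points, target_point_count=10000, y_index=1):
--     if not points:
--         return []
--
--     tuple_len = len(points[0])
--     if tuple_len < 2:
--         raise ValueError("Each point must have at least 2 elements (x, y)")
--     if tuple_len > 2 and y_index is None:
--         raise ValueError("y_index must be specified when tuple length > 2")
--     if y_index >= tuple_len:
--         raise IndexError(f"y_index {y_index} is out of bounds for tuple of length {tuple_len}")
--
--     if len(points) <= target_point_count:
--         return points
--
--     MIN_POINT_COUNT = 500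
--     if len(points) > MIN_POINT_COUNT and target_point_count < MIN_POINT_COUNT:
--         target_point_count = MIN_POINT_COUNT
--
--     valid_points = [(i, p) for i, p in enumerate(points) if p[y_index] is not None]
--     if not valid_points:
--         return points[:target_point_count]
--
--     # Find the best start and end points (minimum y value if multiple points at same x)
--     x_index = 0  # x is always at index 0
--
--     # Find best start point (minimum y value among points with same x as first point)
--     start_x = points[0][x_index]
--     start_candidates = [(i, p) for i, p in enumerate(points) if p[x_index] == start_x and p[y_index] is not None]
--     start_idx = min(start_candidates, key=lambda x: x[1][y_index])[0] if start_candidates else 0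
--
--     # Find best end point (minimum y value among points with same x as last point)
--     end_x = points[-1][x_index]
--     end_candidates = [(i, p) for i, p in enumerate(points) if p[x_index] == end_x and p[y_index] is not None]
--     end_idx = min(end_candidates, key=lambda x: x[1][y_index])[0] if end_candidates else len(points) - 1
--
--     y_max_idx = max(valid_points, key=lambda x: x[1][y_index])[0]
--     keep_indices = {start_idx, end_idx, y_max_idx}
--
--     remaining = target_point_count - len(keep_indices)
--     if remaining <= 0:
--         result_points = [points[i] for i in sorted(keep_indices)]
--         return _apply_start_point_zero_condition(result_points, y_index)
--
--     sorted_indices = sorted(keep_indices)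
--     points_per_gap = remaining // (len(sorted_indices) - 1)
--     extra = remaining % (len(sorted_indices) - 1)
--
--     for i in range(len(sorted_indices) - 1):
--         start, end = sorted_indices[i], sorted_indices[i + 1]
--         gap = end - start - 1
--         if gap <= 0:
--             continue
--         n = points_per_gap + (1 if extra > 0 else 0)
--         if extra > 0:
--             extra -= 1
--         if n > 0:
--             available = list(range(start + 1, end))
--             if len(available) <= n:
--                 sampled = available
--             else:
--                 step = len(available) / n
--                 sampled = [available[int(i * step)] for i in range(n)]
--             keep_indices.update(sampled)
--
--     result_points = [points[i] for i in sorted(keep_indices)]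
--     return _apply_start_point_zero_condition(result_points, y_index)
-- ===== SOURCE B (Python) =====
-- def _apply_start_point_zero_condition(points, y_index=1):
--     if not points or len(points[0]) <= y_index:
--         return points
--     first_point = points[0]
--     x_val, y_val = first_point[0], first_point[y_index]
--     if x_val > 0 and y_val > 0:
--         modified_point = list(first_point)
--         modified_point[y_index] = 0
--         points[0] = tuple(modified_point)
--     return points
--
--
-- def downsample_points(points, target_point_count=10000, y_index=1):
--     if not points:
--         return []
--
--     tuple_len = len(points[0])
--     if tuple_len < 2:
--         raise ValueError("Each point must have at least 2 elements (x, y)")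
--     if tuple_len > 2 and y_index is None:
--         raise ValueError("y_index must be specified when tuple length > 2")
--     if y_index >= tuple_len:
--         raise IndexError(f"y_index {y_index} is out of bounds for tuple of length {tuple_len}")
--
--     if len(points) <= target_point_count:
--         return points
--
--     MIN_POINT_COUNT = 500
--     if len(points) > MIN_POINT_COUNT and target_point_count < MIN_POINT_COUNT:
--         target_point_count = MIN_POINT_COUNT
--
--     # ONE pass instead of four scans: first-wins min/min/max trackers.
--     start_x = points[0][0]
--     end_x = points[-1][0]
--     best_start = best_end = best_max = None  # (index, point) pairs
--     for ip in enumerate(points):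
--         _, p = ip
--         y = p[y_index]
--         if p[0] == start_x and y is not None and (best_start is None or y < best_start[1][y_index]):
--             best_start = ip
--         if p[0] == end_x and y is not None and (best_end is None or y < best_end[1][y_index]):
--             best_end = ip
--         if y is not None and (best_max is None or y > best_max[1][y_index]):
--             best_max = ip
--
--     if best_max is None:
--         return points[:target_point_count]
--
--     start_idx = best_start[0] if best_start is not None else 0
--     end_idx = best_end[0] if best_end is not None else len(points) - 1
--     y_max_idx = best_max[0]
--
--     # gap-sampling tail: unchanged from the original
--     keep_indices = {start_idx, end_idx, y_max_idx}
--
--     remaining = target_point_count - len(keep_indices)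
--     if remaining <= 0:
--         result_points = [points[i] for i in sorted(keep_indices)]
--         return _apply_start_point_zero_condition(result_points, y_index)
--
--     sorted_indices = sorted(keep_indices)
--     points_per_gap = remaining // (len(sorted_indices) - 1)
--     extra = remaining % (len(sorted_indices) - 1)
--
--     for i in range(len(sorted_indices) - 1):
--         start, end = sorted_indices[i], sorted_indices[i + 1]
--         gap = end - start - 1
--         if gap <= 0:
--             continue
--         n = points_per_gap + (1 if extra > 0 else 0)
--         if extra > 0:
--             extra -= 1
--         if n > 0:
--             available = list(range(start + 1, end))
--             if len(available) <= n:
--                 sampled = available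
--             else:
--                 step = len(available) / n
--                 sampled = [available[int(i * step)] for i in range(n)]
--             keep_indices.update(sampled)
--
--     result_points = [points[i] for i in sorted(keep_indices)]
--     return _apply_start_point_zero_condition(result_points, y_index)
-- ===== Notes on version B (the rewrite author's own statement) =====
-- stated objective: alternative
-- what changed: The four separate scans over the points (valid_points comprehension, start-candidate min, end-candidate min, global y-max) are replaced by a single enumerate pass maintaining three first-wins min/min/max trackers; the early returns, fallbacks and the gap-sampling tail are unchanged.
import Mathlib
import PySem

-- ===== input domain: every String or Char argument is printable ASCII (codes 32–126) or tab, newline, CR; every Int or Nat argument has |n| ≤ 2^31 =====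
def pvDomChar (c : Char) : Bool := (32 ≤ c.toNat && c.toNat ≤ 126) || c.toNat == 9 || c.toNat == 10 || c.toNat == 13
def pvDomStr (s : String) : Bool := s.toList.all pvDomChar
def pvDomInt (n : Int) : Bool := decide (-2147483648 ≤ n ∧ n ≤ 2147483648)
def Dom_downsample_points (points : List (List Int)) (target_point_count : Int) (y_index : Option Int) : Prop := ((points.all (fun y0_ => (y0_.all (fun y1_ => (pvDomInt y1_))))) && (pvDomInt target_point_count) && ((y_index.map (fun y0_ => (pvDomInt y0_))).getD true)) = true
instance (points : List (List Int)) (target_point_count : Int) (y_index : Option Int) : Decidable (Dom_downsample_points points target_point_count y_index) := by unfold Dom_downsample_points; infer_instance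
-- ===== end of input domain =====

-- B replaces A's four scans (valid_points, two candidate mins, y_max) by ONE first-wins
-- tracker pass over enumerate(points); the gap-sampling tail is shared VERBATIM by Source A and
-- Source B, so it is defined once below (pvGapFill/pvApplyStartZero) and called by both ports.
-- A mutates result_points[0] in place inside its own fresh list only; the input list is not mutated.

-- ---- shared helpers: exact transliterations of code both Python sources contain verbatim ----

-- `_apply_start_point_zero_condition` (module helper used by both Source A and Source B)
def pvApplyStartZero (pts : List (List Int)) (k : Int) : List (List Int) :=
  if pts = [] ∨ PySem.List.len (PySem.List.pyGetD pts 0 []) ≤ k then pts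
  else
    let fp := PySem.List.pyGetD pts 0 []
    let xv := PySem.List.pyGetD fp 0 0
    let yv := PySem.List.pyGetD fp k 0
    if 0 < xv ∧ 0 < yv then PySem.List.pySetD pts 0 (PySem.List.pySetD fp k 0) else pts

-- IEEE-754 double emulation of Python's `int(i * (len(available) / n))` (both sources contain
-- this exact line).  pvFlRat p q = the double nearest to p/q (round half to even), returned as a
-- dyadic pair (mantissa m, exponent e) with value m·2^(e-52); exact for the positive arguments
-- this code produces (checked against CPython on random triples up to 2^31).
def pvFlGe (p q : Nat) (e : Int) : Bool :=
  if 0 ≤ e then decide (q * 2 ^ e.toNat ≤ p) else decide (q ≤ p * 2 ^ (-e).toNat)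

def pvFlRat (p q : Nat) : Nat × Int :=
  let e0 : Int := (Nat.log2 p : Int) - (Nat.log2 q : Int)
  let e := if pvFlGe p q e0 then e0 else e0 - 1
  let a := if e ≤ 52 then p * 2 ^ (52 - e).toNat else p
  let b := if e ≤ 52 then q else q * 2 ^ (e - 52).toNat
  let t := a / b
  let r := a % b
  (if b < 2 * r ∨ (2 * r = b ∧ t % 2 = 1) then t + 1 else t, e)

-- int(i * step) where step = L/n in doubles (i ≥ 0, 0 < n < L as called)
def pvTrunc (i L n : Int) : Int :=
  if i = 0 then 0
  else
    let s := pvFlRat L.toNat n.toNat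
    let s2 := if s.2 ≤ 52 then pvFlRat (i.toNat * s.1) (2 ^ (52 - s.2).toNat)
              else pvFlRat (i.toNat * s.1 * 2 ^ (s.2 - 52).toNat) 1
    if s2.2 ≤ 52 then ((s2.1 / 2 ^ (52 - s2.2).toNat : Nat) : Int)
    else ((s2.1 * 2 ^ (s2.2 - 52).toNat : Nat) : Int)

-- the gap-sampling tail (identical lines in Source A and Source B), from `keep_indices = {…}` to the end
def pvGapFill (points : List (List Int)) (target k start_idx end_idx y_max_idx : Int) :
    List (List Int) :=
  let keep : PySem.Set Int := PySem.Set.ofList [start_idx, end_idx, y_max_idx]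
  let remaining := target - PySem.Set.len keep
  if remaining ≤ 0 then
    pvApplyStartZero ((PySem.List.sorted keep (fun x => x) false).map
      (fun i => PySem.List.pyGetD points i [])) k
  else
    let sorted_indices := PySem.List.sorted keep (fun x => x) false
    let points_per_gap := PySem.Int.floordiv remaining (PySem.List.len sorted_indices - 1)
    let extra := PySem.Int.mod remaining (PySem.List.len sorted_indices - 1)
    let st := (PySem.List.pyRange 0 (PySem.List.len sorted_indices - 1) 1).foldl
      (fun (st : PySem.Set Int × Int) i =>
        let start := PySem.List.pyGetD sorted_indices i 0
        let stop := PySem.List.pyGetD sorted_indices (i + 1) 0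
        let gap := stop - start - 1
        if gap ≤ 0 then st
        else
          let n := points_per_gap + (if 0 < st.2 then 1 else 0)
          let extra' := if 0 < st.2 then st.2 - 1 else st.2
          if 0 < n then
            let available := PySem.List.pyRange (start + 1) stop 1
            let sampled :=
              if PySem.List.len available ≤ n then available
              else (PySem.List.pyRange 0 n 1).map
                (fun j => PySem.List.pyGetD available (pvTrunc j (PySem.List.len available) n) 0)
            (PySem.Set.update st.1 sampled, extra')
          else (st.1, extra'))
      (keep, extra)
    pvApplyStartZero ((PySem.List.sorted st.1 (fun x => x) false).map
      (fun i => PySem.List.pyGetD points i [])) k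

-- ===== PORT A =====
-- literal transliteration of Source A's downsample_points; on inputs where the Python raises
-- (ValueError/TypeError/IndexError/ZeroDivisionError — excluded by Pre_) it returns a dummy []
def downsample_points (points : List (List Int)) (target_point_count : Int) (y_index : Option Int) : List (List Int) :=
  if points = [] then []
  else
    let tuple_len := PySem.List.len (PySem.List.pyGetD points 0 [])
    if tuple_len < 2 then []            -- raise ValueError
    else
      match y_index with
      | none => []                      -- raise ValueError / TypeError at the comparison
      | some k =>
        if tuple_len ≤ k then []        -- raise IndexError
        else if PySem.List.len points ≤ target_point_count then points
        else
          let target := if 500 < PySem.List.len points ∧ target_point_count < 500 then 500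
                        else target_point_count
          let enum := PySem.List.enumerate points 0
          let valid := enum.filter (fun ip => (PySem.List.pyGet? ip.2 k).isSome)
          if valid = [] then PySem.List.slice points none (some target)
          else
            let key := fun (ip : Int × List Int) => PySem.List.pyGetD ip.2 k 0
            let start_x := PySem.List.pyGetD (PySem.List.pyGetD points 0 []) 0 0
            let start_candidates := enum.filter (fun ip =>
              decide (PySem.List.pyGetD ip.2 0 0 = start_x) && (PySem.List.pyGet? ip.2 k).isSome)
            let start_idx := match PySem.List.min? start_candidates key with
              | some z => z.1 | none => 0
            let end_x := PySem.List.pyGetD (PySem.List.pyGetD points (-1) []) 0 0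
            let end_candidates := enum.filter (fun ip =>
              decide (PySem.List.pyGetD ip.2 0 0 = end_x) && (PySem.List.pyGet? ip.2 k).isSome)
            let end_idx := match PySem.List.min? end_candidates key with
              | some z => z.1 | none => PySem.List.len points - 1
            let y_max_idx := match PySem.List.max? valid key with
              | some z => z.1 | none => 0   -- unreachable: this branch has valid ≠ []
            pvGapFill points target k start_idx end_idx y_max_idx

-- ===== PORT B =====
-- B-side helper: one first-wins tracker (`if cond(ip): best = ip if better else best`);
-- Source B's `y is not None` guard lives inside each tracker's condition
def pvTrackMin (cond : Int × List Int → Bool) (key : Int × List Int → Int)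
    (acc : Option (Int × List Int)) (ip : Int × List Int) : Option (Int × List Int) :=
  if cond ip then
    match acc with
    | none => some ip
    | some m => if key ip < key m then some ip else some m
  else acc

def pvTrackMax (cond : Int × List Int → Bool) (key : Int × List Int → Int)
    (acc : Option (Int × List Int)) (ip : Int × List Int) : Option (Int × List Int) :=
  if cond ip then
    match acc with
    | none => some ip
    | some m => if key m < key ip then some ip else some m
  else acc

def downsample_points_alt (points : List (List Int)) (target_point_count : Int) (y_index : Option Int) : List (List Int) :=
  if points = [] then []
  else
    let tuple_len := PySem.List.len (PySem.List.pyGetD points 0 [])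
    if tuple_len < 2 then []
    else
      match y_index with
      | none => []
      | some k =>
        if tuple_len ≤ k then []
        else if PySem.List.len points ≤ target_point_count then points
        else
          let target := if 500 < PySem.List.len points ∧ target_point_count < 500 then 500
                        else target_point_count
          let key := fun (ip : Int × List Int) => PySem.List.pyGetD ip.2 k 0
          let start_x := PySem.List.pyGetD (PySem.List.pyGetD points 0 []) 0 0
          let end_x := PySem.List.pyGetD (PySem.List.pyGetD points (-1) []) 0 0
          let condS := fun (ip : Int × List Int) =>
            decide (PySem.List.pyGetD ip.2 0 0 = start_x) && (PySem.List.pyGet? ip.2 k).isSome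
          let condE := fun (ip : Int × List Int) =>
            decide (PySem.List.pyGetD ip.2 0 0 = end_x) && (PySem.List.pyGet? ip.2 k).isSome
          let condV := fun (ip : Int × List Int) => (PySem.List.pyGet? ip.2 k).isSome
          -- the single pass: three independent trackers over one enumerate traversal
          let scan := (PySem.List.enumerate points 0).foldl
            (fun st ip =>
              (pvTrackMin condS key st.1 ip, pvTrackMin condE key st.2.1 ip,
               pvTrackMax condV key st.2.2 ip))
            (none, none, none)
          match scan.2.2 with
          | none => PySem.List.slice points none (some target)
          | some bm =>
            let start_idx := match scan.1 with | some z => z.1 | none => 0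
            let end_idx := match scan.2.1 with | some z => z.1 | none => PySem.List.len points - 1
            pvGapFill points target k start_idx end_idx bm.1

-- ===== PRECONDITION & SPEC =====
def pvRowX (points : List (List Int)) (i : Nat) : Int := (points.getD i []).getD 0 0
def pvRowY (points : List (List Int)) (k : Int) (i : Nat) : Int :=
  PySem.List.pyGetD (points.getD i []) k 0

-- the degenerate inputs on which A's three anchors coincide (all three scans pick the same
-- index) while remaining > 0: there A divides by len({i})-1 = 0 (ZeroDivisionError)
def pvCrash (points : List (List Int)) (tp k : Int) : Bool :=
  let n := points.length
  let tp' : Int := if 500 < (n : Int) ∧ tp < 500 then 500 else tp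
  decide (2 ≤ tp') && decide (pvRowX points 0 = pvRowX points (n - 1)) &&
  (List.range n).any (fun i =>
    decide (pvRowX points i = pvRowX points 0) &&
    (List.range n).all (fun j => decide (pvRowY points k j ≤ pvRowY points k i)) &&
    (List.range i).all (fun j => decide (pvRowY points k j < pvRowY points k i)) &&
    (List.range n).all (fun j =>
      !decide (pvRowX points j = pvRowX points 0) || decide (pvRowY points k i ≤ pvRowY points k j)) &&
    (List.range i).all (fun j =>
      !decide (pvRowX points j = pvRowX points 0) || decide (pvRowY points k i < pvRowY points k j)))

-- Pre_ = exactly the inputs on which the Python A returns: it excludes the raising inputs only —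
-- first row shorter than 2, y_index = None or ≥ len(row0) (ValueError/TypeError/IndexError),
-- an index y_index invalid for some traversed row (IndexError), and the single-anchor
-- degenerate case pvCrash where A raises ZeroDivisionError.
def Pre_downsample_points (points : List (List Int)) (target_point_count : Int) (y_index : Option Int) : Prop :=
  points = [] ∨
  (y_index.isSome = true ∧
   2 ≤ (points.getD 0 []).length ∧
   y_index.getD 0 < ((points.getD 0 []).length : Int) ∧
   ((points.length : Int) ≤ target_point_count ∨
    ((∀ p ∈ points, PySem.Raise.InRange p.length (y_index.getD 0)) ∧
     pvCrash points target_point_count (y_index.getD 0) = false)))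

instance (points : List (List Int)) (target_point_count : Int) (y_index : Option Int) : Decidable (Pre_downsample_points points target_point_count y_index) := by
  unfold Pre_downsample_points; infer_instance

def pvWitness_downsample_points : List (List Int) × Int × Option Int :=
  ([[0, 1], [1, 2], [2, 3]], 2, some 1)

def Spec_downsample_points (points : List (List Int)) (target_point_count : Int) (y_index : Option Int) (out : List (List Int)) : Prop := out = downsample_points_alt points target_point_count y_index
instance (points : List (List Int)) (target_point_count : Int) (y_index : Option Int) (out : List (List Int)) : Decidable (Spec_downsample_points points target_point_count y_index out) := by unfold Spec_downsample_points; infer_instance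

-- ===== CLAIM (what is proved, stated in full; the proofs are below) =====
def Claim_equal_downsample_points : Prop := ∀ (points : List (List Int)) (target_point_count : Int) (y_index : Option Int), Dom_downsample_points points target_point_count y_index → Pre_downsample_points points target_point_count y_index → Spec_downsample_points points target_point_count y_index (downsample_points points target_point_count y_index)

-- ===== LEMMAS AND PROOFS =====

-- a first-wins min tracker over l IS Python's min(filter(cond, l), key) (= PySem min?)
theorem pvTrackMin_foldl (l : List (Int × List Int)) (cond : Int × List Int → Bool)
    (key : Int × List Int → Int) :
    l.foldl (fun acc ip => pvTrackMin cond key acc ip) none =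
      PySem.List.min? (l.filter cond) key := by
  unfold pvTrackMin PySem.List.min?
  rw [PySem.List.foldl_if_eq_foldl_filter]
  exact PySem.List.foldl_congr_mem _ _ _ _ (fun acc x _ => by cases acc <;> rfl)

theorem pvTrackMax_foldl (l : List (Int × List Int)) (cond : Int × List Int → Bool)
    (key : Int × List Int → Int) :
    l.foldl (fun acc ip => pvTrackMax cond key acc ip) none =
      PySem.List.max? (l.filter cond) key := by
  unfold pvTrackMax PySem.List.max?
  rw [PySem.List.foldl_if_eq_foldl_filter]
  exact PySem.List.foldl_congr_mem _ _ _ _ (fun acc x _ => by cases acc <;> rfl)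

-- B's single tracker pass = A's three separate min/min/max scans
theorem pvScan_eq (l : List (Int × List Int)) (cS cE cV : Int × List Int → Bool)
    (key : Int × List Int → Int) :
    l.foldl (fun st ip =>
        (pvTrackMin cS key st.1 ip, pvTrackMin cE key st.2.1 ip, pvTrackMax cV key st.2.2 ip))
      (none, none, none) =
    (PySem.List.min? (l.filter cS) key, PySem.List.min? (l.filter cE) key,
     PySem.List.max? (l.filter cV) key) := by
  calc l.foldl (fun st ip =>
          (pvTrackMin cS key st.1 ip, pvTrackMin cE key st.2.1 ip, pvTrackMax cV key st.2.2 ip))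
        (none, none, none)
      = (l.foldl (fun a ip => pvTrackMin cS key a ip) none,
         l.foldl (fun (b : Option (Int × List Int) × Option (Int × List Int)) ip =>
           (pvTrackMin cE key b.1 ip, pvTrackMax cV key b.2 ip)) (none, none)) :=
        PySem.List.foldl_prod_mk
          (f := fun a ip => pvTrackMin cS key a ip)
          (g := fun (b : Option (Int × List Int) × Option (Int × List Int)) ip =>
            (pvTrackMin cE key b.1 ip, pvTrackMax cV key b.2 ip)) (l := l)
          (a := none) (b := (none, none))
    _ = (l.foldl (fun a ip => pvTrackMin cS key a ip) none,
         (l.foldl (fun a ip => pvTrackMin cE key a ip) none,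
          l.foldl (fun a ip => pvTrackMax cV key a ip) none)) :=
        congrArg _ (PySem.List.foldl_prod_mk
          (f := fun a ip => pvTrackMin cE key a ip)
          (g := fun a ip => pvTrackMax cV key a ip) (l := l) (a := none) (b := none))
    _ = (PySem.List.min? (l.filter cS) key, PySem.List.min? (l.filter cE) key,
         PySem.List.max? (l.filter cV) key) := by
        rw [pvTrackMin_foldl, pvTrackMin_foldl, pvTrackMax_foldl]

-- the two ports agree on every input (Pre_ is only needed on the Python side, where A raises
-- on the excluded inputs)
theorem pv_main (points : List (List Int)) (target_point_count : Int) (y_index : Option Int) :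
    downsample_points points target_point_count y_index =
      downsample_points_alt points target_point_count y_index := by
  unfold downsample_points downsample_points_alt
  cases y_index with
  | none => rfl
  | some k =>
    by_cases h0 : points = []
    · subst h0; rfl
    · simp only [if_neg h0]
      by_cases h1 : PySem.List.len (PySem.List.pyGetD points 0 []) < 2
      · simp only [if_pos h1]
      · simp only [if_neg h1]
        by_cases h2 : PySem.List.len (PySem.List.pyGetD points 0 []) ≤ k
        · simp only [if_pos h2]
        · simp only [if_neg h2]
          by_cases h3 : PySem.List.len points ≤ target_point_count
          · simp only [if_pos h3]
          · simp only [if_neg h3]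
            rw [pvScan_eq]
            rcases hmax : PySem.List.max?
                ((PySem.List.enumerate points 0).filter
                  (fun ip => (PySem.List.pyGet? ip.2 k).isSome))
                (fun ip => PySem.List.pyGetD ip.2 k 0) with _ | z
            · have hv := (PySem.List.max?_eq_none_iff
                  ((PySem.List.enumerate points 0).filter
                    (fun ip => (PySem.List.pyGet? ip.2 k).isSome))
                  (fun ip => PySem.List.pyGetD ip.2 k 0)).mp hmax
              rw [hmax, if_pos hv]
            · have hv : ((PySem.List.enumerate points 0).filter
                  (fun ip => (PySem.List.pyGet? ip.2 k).isSome)) ≠ [] := by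
                intro h
                rw [(PySem.List.max?_eq_none_iff _
                      (fun ip => PySem.List.pyGetD ip.2 k 0)).mpr h] at hmax
                simp at hmax
              rw [hmax, if_neg hv]

-- ===== VERDICT (by name: the statement is the Claim_ definition above) =====
theorem downsample_points_spec : Claim_equal_downsample_points := by
  intro points target_point_count y_index _ _
  unfold Spec_downsample_points
  exact pv_main points target_point_count y_index
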